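-- pv_equiv track=rewrite | github.com/kms825252/Algorithm | 22_12/programmers/72410.py | solution
-- ===== SOURCE A (Python) =====
-- def solution(new_id):
--     # 1단계
--     word = []
--     for i in range(len(new_id)):
--         word.append(new_id[i])
--         if 65 <= ord(word[i]) <= 90:
--             word[i] = chr(ord(word[i]) + 32)
--
--     # 2단계
--     new_word = []
--     for j in range(len(word)):
--         if 97 <= ord(word[j]) <= 122 or word[j].isdigit() or word[j] == '-' or word[j] == '_' or word[j] == '.':
--             new_word.append(word[j])
--
--     # 3단계
--     n = 0
--     while True:
--         if n == len(new_word) - 1: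
--             break
--
--         if new_word[n] == '.' and new_word[n+1] == '.':
--             del new_word[n+1]
--             n = 0
--             continue
--         n += 1
--
--     # 4단계
--     if new_word:
--         if new_word[0] == '.':
--             del new_word[0]
--     if new_word:
--         if new_word[-1] == '.':
--             del new_word[-1]
--
--     # 5단계
--     if not new_word:
--         new_word.append('a')
--
--     # 6단계
--     if len(new_word) >= 16:
--         new_word = new_word[0:15]
--
--     if new_word[-1] == '.':
--         del new_word[-1]
--
--     # 7단계
--     if len(new_word) <= 2:
--         while len(new_word) <3:
--             new_word.append(new_word[-1])
--
--     answer = ''.join(new_word)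
--     return answer
-- ===== SOURCE B (Python) =====
-- def solution(new_id):
--     # filter: lowercase, keep a-z / digits / -_.
--     s = ''.join(c for c in new_id.lower()
--                 if 'a' <= c <= 'z' or c.isdigit() or c in '-_.')
--     # single left-to-right pass: drop a '.' that would start the string or follow a '.'
--     out = []
--     for c in s:
--         if c != '.' or (out and out[-1] != '.'):
--             out.append(c)
--     s = ''.join(out).rstrip('.')
--     if not s:
--         s = 'a'
--     s = s[:15].rstrip('.')
--     if len(s) < 3:
--         s += s[-1] * (3 - len(s))
--     return s
-- ===== Notes on version B (the rewrite author's own statement) =====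
-- stated objective: faster
-- what changed: A collapses repeated dots with an index loop that deletes one dot at a time and restarts the scan from index 0, and pads with a while-append loop; B does the dot collapsing and leading-dot stripping in one left-to-right pass, strips trailing dots in one step, and pads by repeating the final character arithmetically.
-- crash fix: On inputs where no character survives the lowering/filter step (for example the empty string or pure punctuation), A raises IndexError in its collapse loop by indexing an empty list; B returns the padded default identifier 'aaa'. — e.g. on solution(""): A raises IndexError, B returns "aaa"
import Mathlib
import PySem

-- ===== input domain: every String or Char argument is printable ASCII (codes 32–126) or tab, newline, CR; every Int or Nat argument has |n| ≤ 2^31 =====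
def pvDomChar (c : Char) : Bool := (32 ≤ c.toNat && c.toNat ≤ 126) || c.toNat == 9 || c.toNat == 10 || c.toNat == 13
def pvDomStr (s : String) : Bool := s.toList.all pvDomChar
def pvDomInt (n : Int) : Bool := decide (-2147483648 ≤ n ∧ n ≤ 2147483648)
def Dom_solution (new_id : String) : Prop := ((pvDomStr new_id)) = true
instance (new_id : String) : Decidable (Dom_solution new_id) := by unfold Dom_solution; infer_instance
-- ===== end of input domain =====

-- B replaces A's quadratic restart-from-0 delete loop for '..' collapsing by a single left-to-right
-- pass (and replicate-based padding); same return value wherever A returns.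

-- ===== PORT A =====
-- step 1's per-character lowering (ord 65..90 -> +32) and step 2's keep test, as in A.
def pvLowerA (c : Char) : Char :=
  if 65 ≤ c.toNat ∧ c.toNat ≤ 90 then Char.ofNat (c.toNat + 32) else c
-- `word[j].isdigit()` ported with PySem.Chars.isdigit (exact on the ASCII domain).
def pvKeepA (c : Char) : Bool :=
  decide (97 ≤ c.toNat ∧ c.toNat ≤ 122) || PySem.Chars.isdigit c || c == '-' || c == '_' || c == '.'

-- A's step-3 while loop: scan with index n, delete the second of two adjacent dots, reset n to 0.
-- On an empty list Python raises IndexError (those inputs are excluded by Pre_solution); the first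
-- guard returns [] there.  The second guard is Python's `n == len(new_word) - 1` break (states with
-- n > len - 1 are unreachable from the entry call n = 0).
def pvStep3 (l : List Char) (n : Nat) : List Char :=
  if _h0 : l = [] then l
  else if _h1 : l.length - 1 ≤ n then l
  else if l.getD n ' ' = '.' ∧ l.getD (n+1) ' ' = '.' then
    pvStep3 (l.eraseIdx (n+1)) 0
  else
    pvStep3 l (n+1)
termination_by (l.length, l.length - n)
decreasing_by
  · have hne : l ≠ [] := _h0
    have h1 : 1 ≤ l.length := List.length_pos_of_ne_nil hne
    have h2 : n + 1 < l.length := by omega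
    have : (l.eraseIdx (n+1)).length = l.length - 1 := by
      rw [List.length_eraseIdx_of_lt h2]
    apply Prod.Lex.left
    omega
  · have hne : l ≠ [] := _h0
    have h1 : 1 ≤ l.length := List.length_pos_of_ne_nil hne
    apply Prod.Lex.right
    omega

-- A's step-7 while loop: append the last element until length 3.
def pvPad (l : List Char) : List Char :=
  if l.length < 3 then pvPad (l ++ [l.getLastD 'a']) else l
termination_by 3 - l.length
decreasing_by simp; omega

def solution (new_id : String) : String :=
  -- step 1: append each char, lowering A..Z in place
  let word := new_id.toList.foldl (fun w c => w ++ [pvLowerA c]) []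
  -- step 2
  let nw0 := word.foldl (fun nw c => if pvKeepA c then nw ++ [c] else nw) []
  -- step 3
  let nw1 := pvStep3 nw0 0
  -- step 4 (`if new_word:` guard folded into getD defaults: headD/getLastD of [] is ' ' ≠ '.')
  let nw2 := if nw1.headD ' ' = '.' then nw1.tail else nw1
  let nw3 := if nw2.getLastD ' ' = '.' then nw2.dropLast else nw2
  -- step 5
  let nw4 := if nw3 = [] then ['a'] else nw3
  -- step 6 (`new_word[-1]`: the list is nonempty here)
  let nw5 := if 16 ≤ nw4.length then nw4.take 15 else nw4
  let nw6 := if nw5.getLastD ' ' = '.' then nw5.dropLast else nw5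
  -- step 7
  let nw7 := if nw6.length ≤ 2 then pvPad nw6 else nw6
  String.ofList nw7

-- ===== PORT B =====
def pvKeepB (c : Char) : Bool :=
  decide ('a' ≤ c ∧ c ≤ 'z') || PySem.Chars.isdigit c || c == '-' || c == '_' || c == '.'

-- B's for loop: append c unless it is a '.' that would start the string or follow a '.'.
def pvCollapse (out : List Char) : List Char → List Char
  | [] => out
  | c :: rest =>
    if c ≠ '.' ∨ (out ≠ [] ∧ out.getLastD ' ' ≠ '.') then pvCollapse (out ++ [c]) rest
    else pvCollapse out rest

-- s.rstrip('.')  (hand port: drop the trailing run of dots; exact)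
def pvRstripDots (l : List Char) : List Char :=
  (l.reverse.dropWhile (fun c => c == '.')).reverse

def solution_alt (new_id : String) : String :=
  let kept := (PySem.Str.lower new_id).toList.filter pvKeepB
  let s1 := pvRstripDots (pvCollapse [] kept)
  let s2 := if s1 = [] then ['a'] else s1
  let s3 := pvRstripDots (s2.take 15)
  let s4 := if s3.length < 3 then s3 ++ List.replicate (3 - s3.length) (s3.getLastD 'a') else s3
  String.ofList s4

-- ===== PRECONDITION & SPEC =====
-- keep-after-lowering test, written directly on the input character
def pvPreKeep (c : Char) : Bool :=
  let d := PySem.Chars.lowerChar c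
  decide ('a' ≤ d ∧ d ≤ 'z') || PySem.Chars.isdigit d || d == '-' || d == '_' || d == '.'

-- Pre_ excludes exactly the inputs on which A raises IndexError: those where no character of
-- new_id survives the step-1/2 lowering-and-filter (A's step-3 loop then indexes an empty list).
def Pre_solution (new_id : String) : Prop := new_id.toList.filter pvPreKeep ≠ []
instance (new_id : String) : Decidable (Pre_solution new_id) := by unfold Pre_solution; infer_instance
def pvWitness_solution : String := "abc"

-- On inputs with no surviving character (e.g. "", "!!"), A raises IndexError in its step-3 loop;
-- B returns "aaa" (empty id -> 'a' -> padded), the natural valid id there.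
def Raises_solution (new_id : String) : Prop := new_id.toList.filter pvPreKeep = []
instance (new_id : String) : Decidable (Raises_solution new_id) := by unfold Raises_solution; infer_instance
def pvRaiseWitness_solution : String := ""
def pvRaiseWitnessOut_solution : String := "aaa"

def Spec_solution (new_id : String) (out : String) : Prop := out = solution_alt new_id
instance (new_id : String) (out : String) : Decidable (Spec_solution new_id out) := by unfold Spec_solution; infer_instance

-- ===== CLAIM (what is proved, stated in full; the proofs are below) =====
def Claim_equal_solution : Prop := ∀ (new_id : String), Dom_solution new_id → Pre_solution new_id → Spec_solution new_id (solution new_id)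
def Claim_raises_solution : Prop := (∀ (new_id : String), Dom_solution new_id → Raises_solution new_id → ¬ Pre_solution new_id) ∧ (Dom_solution (pvRaiseWitness_solution) ∧ Raises_solution (pvRaiseWitness_solution) ∧ solution_alt (pvRaiseWitness_solution) = pvRaiseWitnessOut_solution)

-- ===== LEMMAS AND PROOFS =====

-- canonical one-pass collapse, parameterised by the previously emitted character
def pvCanon (prev : Option Char) : List Char → List Char
  | [] => []
  | c :: t =>
    if c = '.' ∧ (prev = none ∨ prev = some '.') then pvCanon prev t
    else c :: pvCanon (some c) t

-- the result of A's step 3 on a nonempty list: head kept, tail canonically collapsed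
def pvSq (l : List Char) : List Char :=
  match l with
  | [] => []
  | c :: t => c :: pvCanon (some c) t

-- "l has no two adjacent dots"
def pvClean (l : List Char) : Prop :=
  ∀ k, k + 1 < l.length → ¬(l.getD k ' ' = '.' ∧ l.getD (k+1) ' ' = '.')

theorem pvCanon_dotty (l : List Char) : pvCanon (some '.') l = pvCanon none l := by
  induction l with
  | nil => rfl
  | cons c t ih =>
    by_cases hc : c = '.'
    · simp [pvCanon, hc, ih]
    · simp [pvCanon, hc]


theorem pvCanon_erase (t : List Char) (j : Nat) (p : Option Char)
    (hj : j + 1 < t.length) (h1 : t.getD j ' ' = '.') (h2 : t.getD (j+1) ' ' = '.') :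
    pvCanon p (t.eraseIdx (j+1)) = pvCanon p t := by
  induction t generalizing j p with
  | nil => simp at hj
  | cons c t ih =>
    cases j with
    | zero =>
      simp only [List.getD_cons_zero] at h1
      have ht : t ≠ [] := by intro h; subst h; simp at hj
      obtain ⟨d, t', rfl⟩ := List.exists_cons_of_ne_nil ht
      simp only [List.getD_cons_succ, List.getD_cons_zero] at h2
      subst h1; subst h2
      show pvCanon p ('.' :: t') = pvCanon p ('.' :: '.' :: t')
      by_cases hp : p = none ∨ p = some '.'
      · simp [pvCanon, hp]
      · simp [pvCanon, hp]
    | succ j' =>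
      have hlen : j' + 1 < t.length := by simp at hj; omega
      simp only [List.getD_cons_succ] at h1 h2
      show pvCanon p (c :: t.eraseIdx (j'+1)) = pvCanon p (c :: t)
      simp only [pvCanon]
      split
      · exact ih j' p hlen h1 h2
      · rw [ih j' (some c) hlen h1 h2]


theorem pvSq_erase (l : List Char) (j : Nat)
    (hj : j + 1 < l.length) (h1 : l.getD j ' ' = '.') (h2 : l.getD (j+1) ' ' = '.') :
    pvSq (l.eraseIdx (j+1)) = pvSq l := by
  cases l with
  | nil => simp at hj
  | cons c t =>
    cases j with
    | zero =>
      simp only [List.getD_cons_zero] at h1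
      have ht : t ≠ [] := by intro h; subst h; simp at hj
      obtain ⟨d, t', rfl⟩ := List.exists_cons_of_ne_nil ht
      simp only [List.getD_cons_succ, List.getD_cons_zero] at h2
      subst h1; subst h2
      show pvSq ('.' :: t') = pvSq ('.' :: '.' :: t')
      simp [pvSq, pvCanon]
    | succ j' =>
      have hlen : j' + 1 < t.length := by simp at hj; omega
      simp only [List.getD_cons_succ] at h1 h2
      show pvSq (c :: t.eraseIdx (j'+1)) = pvSq (c :: t)
      simp only [pvSq]
      rw [pvCanon_erase t j' (some c) hlen h1 h2]


theorem pvCanon_of_clean (t : List Char) (c : Char) (h : pvClean (c :: t)) :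
    pvCanon (some c) t = t := by
  induction t generalizing c with
  | nil => rfl
  | cons d t ih =>
    have h0 : ¬(c = '.' ∧ d = '.') := by
      have := h 0 (by simp)
      simpa using this
    have hsh : pvClean (d :: t) := by
      intro k hk
      have := h (k+1) (by simp at hk ⊢; omega)
      simpa using this
    simp only [pvCanon]
    rw [if_neg, ih d hsh]
    rintro ⟨hd, hc⟩
    simp at hc
    exact h0 ⟨hc, hd⟩


theorem pvStep3_eq (l : List Char) (n : Nat) (hne : l ≠ [])
    (hpre : ∀ k, k < n → ¬(l.getD k ' ' = '.' ∧ l.getD (k+1) ' ' = '.')) :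
    pvStep3 l n = pvSq l := by
  revert hne hpre
  induction l, n using pvStep3.induct with
  | case1 n =>
    intro hne _
    exact absurd rfl hne
  | case2 l n h0 h1 =>
    intro hne hpre
    rw [pvStep3, dif_neg h0, dif_pos h1]
    obtain ⟨c, t, rfl⟩ := List.exists_cons_of_ne_nil hne
    have hcl : pvClean (c :: t) := by
      intro k hk
      exact hpre k (by simp at hk h1 ⊢; omega)
    rw [pvSq, pvCanon_of_clean t c hcl]
  | case3 l n h0 h1 hbad ih =>
    intro hne hpre
    rw [pvStep3, dif_neg h0, dif_neg h1, if_pos hbad]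
    have hl1 : 1 ≤ l.length := List.length_pos_of_ne_nil h0
    have hlen : n + 1 < l.length := by simp at h1; omega
    have hne' : l.eraseIdx (n+1) ≠ [] := by
      have := List.length_eraseIdx_of_lt hlen
      intro h; rw [h] at this; simp at this; omega
    rw [ih hne' (by intro k hk; omega), pvSq_erase l n hlen hbad.1 hbad.2]
  | case4 l n h0 h1 hbad ih =>
    intro hne hpre
    rw [pvStep3, dif_neg h0, dif_neg h1, if_neg hbad]
    refine ih hne ?_
    intro k hk
    rcases Nat.lt_succ_iff_lt_or_eq.mp hk with h | h
    · exact hpre k h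
    · subst h; exact hbad

theorem pvCollapse_canon (l out : List Char) :
    pvCollapse out l = out ++ pvCanon out.getLast? l := by
  induction l generalizing out with
  | nil => simp [pvCollapse, pvCanon]
  | cons c rest ih =>
    simp only [pvCollapse, pvCanon]
    by_cases hA : c ≠ '.' ∨ (out ≠ [] ∧ out.getLastD ' ' ≠ '.')
    · have hnot : ¬(c = '.' ∧ (out.getLast? = none ∨ out.getLast? = some '.')) := by
        rintro ⟨hc, hd⟩
        rcases hA with h | ⟨h1, h2⟩
        · exact h hc
        · rcases hd with hd | hd
          · rw [List.getLast?_eq_none_iff] at hd; exact h1 hd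
          · rw [List.getLastD_eq_getLast?, hd] at h2; exact h2 rfl
      rw [if_pos hA, ih, List.getLast?_concat, if_neg hnot]
      simp
    · rw [if_neg hA, ih]
      have hc : c = '.' := not_not.mp fun h => hA (Or.inl h)
      have hlast : out ≠ [] → out.getLastD ' ' = '.' :=
        fun h1 => not_not.mp fun h2 => hA (Or.inr ⟨h1, h2⟩)
      rw [if_pos]
      refine ⟨hc, ?_⟩
      cases hout : out.getLast? with
      | none => exact Or.inl rfl
      | some y =>
        right
        have hne : out ≠ [] := by
          intro h; subst h; simp at hout
        have := hlast hne
        rw [List.getLastD_eq_getLast?, hout] at this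
        simp at this
        rw [this] at hout ⊢


theorem pvAstrip_eq (k : List Char) (hk : k ≠ []) :
    (if (pvSq k).headD ' ' = '.' then (pvSq k).tail else pvSq k) = pvCanon none k := by
  obtain ⟨c, t, rfl⟩ := List.exists_cons_of_ne_nil hk
  by_cases hc : c = '.'
  · subst hc
    rw [if_pos (by simp [pvSq])]
    show pvCanon (some '.') t = pvCanon none ('.' :: t)
    rw [pvCanon_dotty]
    simp [pvCanon]
  · rw [if_neg (by simp [pvSq, hc])]
    show pvSq (c :: t) = pvCanon none (c :: t)
    simp [pvSq, pvCanon, hc]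


theorem pvCanon_clean (l : List Char) (c : Char) : pvClean (c :: pvCanon (some c) l) := by
  induction l generalizing c with
  | nil => intro k hk; simp [pvCanon] at hk
  | cons d t ih =>
    simp only [pvCanon]
    by_cases hs : d = '.' ∧ (some c = none ∨ some c = some '.')
    · rw [if_pos hs]
      have hc : c = '.' := by
        rcases hs.2 with h | h
        · simp at h
        · simpa using h
      subst hc
      exact ih '.'
    · rw [if_neg hs]
      intro k hk
      cases k with
      | zero =>
        simp only [List.getD_cons_zero, List.getD_cons_succ]
        rintro ⟨h1, h2⟩
        exact hs ⟨h2, Or.inr (by rw [h1])⟩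
      | succ k' =>
        simp only [List.getD_cons_succ]
        exact ih d k' (by simp at hk ⊢; omega)


theorem pvCanon_none_shape (l : List Char) :
    pvCanon none l = [] ∨ ∃ c t, c ≠ '.' ∧ pvCanon none l = c :: pvCanon (some c) t := by
  induction l with
  | nil => exact Or.inl rfl
  | cons c t ih =>
    by_cases hc : c = '.'
    · simpa [pvCanon, hc] using ih
    · exact Or.inr ⟨c, t, hc, by simp [pvCanon, hc]⟩


theorem pvClean_take (l : List Char) (n : Nat) (h : pvClean l) : pvClean (l.take n) := by
  intro k hk
  rw [List.length_take] at hk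
  have hk1 : k + 1 < n := by omega
  have hk2 : k + 1 < l.length := by omega
  rw [List.getD_eq_getElem _ _ (by rw [List.length_take]; omega),
      List.getD_eq_getElem _ _ (by rw [List.length_take]; omega),
      List.getElem_take, List.getElem_take,
      ← List.getD_eq_getElem _ ' ' (by omega), ← List.getD_eq_getElem _ ' ' (by omega)]
  exact h k hk2


theorem pvClean_prefix {l m : List Char} (h : pvClean l) (hp : m <+: l) : pvClean m := by
  rw [List.prefix_iff_eq_take] at hp
  rw [hp]
  exact pvClean_take l m.length h


theorem pvRstrip_prefix (l : List Char) : pvRstripDots l <+: l := by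
  have h2 : (List.dropWhile (fun c => c == '.') l.reverse).reverse.reverse <:+ l.reverse := by
    simpa using List.dropWhile_suffix (l := l.reverse) (fun c => c == '.')
  exact List.reverse_suffix.mp h2


theorem pvRstrip_eq (m : List Char) (h : pvClean m) :
    (if m.getLastD ' ' = '.' then m.dropLast else m) = pvRstripDots m := by
  cases hm : m.getLast? with
  | none =>
    have : m = [] := List.getLast?_eq_none_iff.mp hm
    subst this
    simp [pvRstripDots]
  | some x =>
    have hne : m ≠ [] := by intro hh; subst hh; simp at hm
    have hdec : m.dropLast ++ [x] = m := by
      have h1 := List.dropLast_append_getLast hne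
      have h2 : m.getLast hne = x := by
        have := List.getLast?_eq_some_getLast hne
        rw [hm] at this
        exact (Option.some.inj this).symm
      rwa [h2] at h1
    have hD : m.getLastD ' ' = x := by rw [List.getLastD_eq_getLast?, hm]; rfl
    by_cases hx : x = '.'
    · subst hx
      rw [if_pos hD]
      cases hD2 : m.dropLast.getLast? with
      | none =>
        have hDe : m.dropLast = [] := List.getLast?_eq_none_iff.mp hD2
        have hm1 : m = ['.'] := by rw [← hdec, hDe]; rfl
        rw [hDe, hm1]
        decide
      | some y =>
        have hne2 : m.dropLast ≠ [] := by intro hh; rw [hh] at hD2; simp at hD2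
        have hdec2 : m.dropLast.dropLast ++ [y] = m.dropLast := by
          have h1 := List.dropLast_append_getLast hne2
          have h2 : m.dropLast.getLast hne2 = y := by
            have := List.getLast?_eq_some_getLast hne2
            rw [hD2] at this
            exact (Option.some.inj this).symm
          rwa [h2] at h1
        have hy : y ≠ '.' := by
          intro hy
          subst hy
          obtain ⟨D, hm2⟩ : ∃ D, m = D ++ ['.', '.'] :=
            ⟨m.dropLast.dropLast, by rw [← hdec, ← hdec2]; simp⟩
          have hk := h D.length
            (by rw [hm2]; simp only [List.length_append, List.length_cons, List.length_nil]; omega)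
          apply hk
          constructor
          · rw [hm2, List.getD_eq_getElem?_getD, List.getElem?_append_right (le_refl _)]
            simp
          · rw [hm2, List.getD_eq_getElem?_getD,
                List.getElem?_append_right (by omega)]
            simp
        have hrev : m.reverse = '.' :: y :: m.dropLast.dropLast.reverse := by
          rw [← hdec, ← hdec2]; simp
        rw [pvRstripDots, hrev]
        simp [hy]
        rw [← hdec2]
        simp
    · rw [if_neg (by rw [hD]; exact hx)]
      have hrev : m.reverse = x :: m.dropLast.reverse := by rw [← hdec]; simp
      rw [pvRstripDots, hrev]
      simp [hx]
      exact hdec.symm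


theorem pvRstrip_head (c : Char) (t : List Char) (hc : c ≠ '.') :
    ∃ t', pvRstripDots (c :: t) = c :: t' := by
  by_cases he : (List.dropWhile (fun c => c == '.') t.reverse).isEmpty
  · exact ⟨[], by simp [pvRstripDots, List.dropWhile_append, he, hc]⟩
  · exact ⟨(List.dropWhile (fun c => c == '.') t.reverse).reverse,
      by simp [pvRstripDots, List.dropWhile_append, he]⟩


theorem pvPad_closed (f : Nat) (m : List Char) (hm : m ≠ []) (hf : 3 - m.length = f) :
    pvPad m = m ++ List.replicate f (m.getLastD 'a') := by
  induction f generalizing m with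
  | zero =>
    rw [pvPad, if_neg (by omega)]
    simp
  | succ f ih =>
    rw [pvPad, if_pos (by omega)]
    have hx : (m ++ [m.getLastD 'a']).getLastD 'a' = m.getLastD 'a' := List.getLastD_concat
    rw [ih (m ++ [m.getLastD 'a']) (by simp) (by simp; omega), hx, List.append_assoc]
    simp [List.replicate_succ]


theorem pvLowerA_eq : pvLowerA = PySem.Chars.lowerChar := by
  funext c
  unfold pvLowerA PySem.Chars.lowerChar PySem.Chars.isupper
  by_cases h : 65 ≤ c.toNat ∧ c.toNat ≤ 90
  · rw [if_pos h, if_pos (by simp only [Bool.and_eq_true, decide_eq_true_eq]; exact ⟨h.1, h.2⟩)]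
  · rw [if_neg h, if_neg (by simp only [Bool.and_eq_true, decide_eq_true_eq]; intro hh; exact h ⟨hh.1, hh.2⟩)]


theorem pvKeepA_eq : pvKeepA = pvKeepB := by
  funext c
  unfold pvKeepA pvKeepB
  rw [show decide (97 ≤ c.toNat ∧ c.toNat ≤ 122) = decide ('a' ≤ c ∧ c ≤ 'z') from
        decide_eq_decide.mpr Iff.rfl]


-- ===== VERDICT (by name: the statement is the Claim_ definition above) =====
theorem solution_spec : Claim_equal_solution := by
  intro s _dom hpre
  unfold Spec_solution solution solution_alt
  simp only [PySem.Str.toList_lower, PySem.Chars.lower]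
  rw [pvLowerA_eq, pvKeepA_eq, PySem.List.foldl_append_singleton_eq_map, List.nil_append]
  have hfilter : List.foldl (fun nw c => if pvKeepB c then nw ++ [c] else nw) ([] : List Char)
      (s.toList.map PySem.Chars.lowerChar)
      = (s.toList.map PySem.Chars.lowerChar).filter pvKeepB := by
    simpa using PySem.List.foldl_append_if pvKeepB (fun x => x)
      (s.toList.map PySem.Chars.lowerChar) []
  rw [hfilter]
  set kept := (s.toList.map PySem.Chars.lowerChar).filter pvKeepB with hkept
  have hcomp : (pvKeepB ∘ PySem.Chars.lowerChar) = pvPreKeep := by funext c; rfl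
  have hkm : kept = List.map PySem.Chars.lowerChar (List.filter pvPreKeep s.toList) := by
    rw [hkept, List.filter_map, hcomp]
  have hne : kept ≠ [] := by
    rw [hkm]
    intro hmap
    rw [List.map_eq_nil_iff] at hmap
    exact hpre hmap
  rw [pvStep3_eq kept 0 hne (fun k hk => absurd hk (Nat.not_lt_zero k)),
      pvAstrip_eq kept hne, pvCollapse_canon]
  simp only [List.getLast?_nil, List.nil_append]
  have hsh := pvCanon_none_shape kept
  have hclean : pvClean (pvCanon none kept) := by
    rcases hsh with h | ⟨c, t, hc, h⟩
    · rw [h]; intro k hk; simp at hk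
    · rw [h]; exact pvCanon_clean t c
  rw [pvRstrip_eq _ hclean]
  set s1 := pvRstripDots (pvCanon none kept) with hs1
  set s2 := (if s1 = [] then ['a'] else s1) with hs2
  have hhead2 : ∃ c t, s2 = c :: t ∧ c ≠ '.' := by
    by_cases h1 : s1 = []
    · exact ⟨'a', [], by rw [hs2, if_pos h1], by decide⟩
    · have hq : pvCanon none kept ≠ [] := by
        intro hq; rw [hs1, hq] at h1; exact h1 rfl
      rcases hsh with h | ⟨c, t, hc, h⟩
      · exact absurd h hq
      · obtain ⟨t', ht'⟩ := pvRstrip_head c (pvCanon (some c) t) hc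
        refine ⟨c, t', ?_, hc⟩
        rw [hs2, if_neg h1, hs1, h, ht']
  have hclean2 : pvClean s2 := by
    by_cases h1 : s1 = []
    · rw [hs2, if_pos h1]; intro k hk; simp at hk
    · rw [hs2, if_neg h1, hs1]
      exact pvClean_prefix hclean (pvRstrip_prefix _)
  have h15 : (if 16 ≤ s2.length then s2.take 15 else s2) = s2.take 15 := by
    split
    · rfl
    · rw [List.take_of_length_le (by omega)]
  rw [h15, pvRstrip_eq _ (pvClean_take s2 15 hclean2)]
  have hne3 : pvRstripDots (s2.take 15) ≠ [] := by
    obtain ⟨c, t, h2, hc⟩ := hhead2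
    rw [h2, List.take_succ_cons]
    obtain ⟨t', ht'⟩ := pvRstrip_head c (t.take 14) hc
    rw [ht']
    exact List.cons_ne_nil c t'
  set s3 := pvRstripDots (s2.take 15) with hs3
  by_cases h3 : s3.length < 3
  · rw [if_pos (by omega), if_pos h3, pvPad_closed (3 - s3.length) s3 hne3 rfl]
  · rw [if_neg (by omega), if_neg h3]

def solution_raises : Claim_raises_solution := by
  unfold Claim_raises_solution
  exact ⟨fun s _ h hp => hp h, by decide⟩
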